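-- pv_equiv track=rewrite | github.com/abarn1/UC-Davis | BAX422/BAX422Final.py | dict_lists_to_list_dict
-- ===== SOURCE A (Python) =====
-- def dict_lists_to_list_dict(dict):
--     nl = []
--     nl_index = []
--     # get the keys of the dictionaries so a list of dictionaries can be created
--     for k in sorted(dict.keys()):
--         nl.append({k: []})
--         nl_index.append(k)
--     # for each item in the original dictionary append the inner dictionaries items to the original dictionaries in the list of dictionaries
--     for key, l in dict.items():
--         # for each of the items get the keys and values to add them to the list of dictionaries
--         for l_key, l_value in l.items():
--             nl[nl_index.index(key)][key].append(l_value)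
--     # return the list of dictionaries
--     return nl
-- ===== SOURCE B (Python) =====
-- def dict_lists_to_list_dict(dict):
--     # online insertion sort: no sorted() call, no parallel index list, no scatter pass --
--     # each item is placed directly at its sorted slot as it is encountered
--     nl = []
--     for k, inner in dict.items():
--         i = 0
--         while i < len(nl) and nl[i][0] < k:
--             i += 1
--         nl.insert(i, (k, list(inner.values())))
--     return [{k: v} for k, v in nl]
-- ===== Notes on version B (the rewrite author's own statement) =====
-- stated objective: alternative
-- what changed: A pre-sorts the keys, builds empty buckets plus a parallel index list, then scatters every inner value into its bucket via an nl_index.index linear scan; B never calls sorted() and keeps no index list: it maintains one sorted list of (key, values) pairs, inserting each item at its sorted slot as it is encountered (online insertion sort), and wraps the pairs at the end.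
import Mathlib
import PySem

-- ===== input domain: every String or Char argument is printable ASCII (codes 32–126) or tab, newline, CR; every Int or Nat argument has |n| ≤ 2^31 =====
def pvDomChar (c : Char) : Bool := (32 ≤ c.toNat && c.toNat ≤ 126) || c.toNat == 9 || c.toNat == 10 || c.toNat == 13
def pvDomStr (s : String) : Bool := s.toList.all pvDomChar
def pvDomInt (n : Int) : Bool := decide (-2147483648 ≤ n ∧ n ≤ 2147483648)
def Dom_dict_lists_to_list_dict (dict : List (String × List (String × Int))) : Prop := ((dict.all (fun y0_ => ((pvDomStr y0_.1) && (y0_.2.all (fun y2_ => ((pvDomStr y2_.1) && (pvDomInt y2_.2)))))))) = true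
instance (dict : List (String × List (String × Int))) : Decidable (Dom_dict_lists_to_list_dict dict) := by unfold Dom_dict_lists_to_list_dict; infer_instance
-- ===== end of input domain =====

-- B replaces A's sort-then-scatter (sorted keys, empty buckets, parallel index list, routing every
-- inner value through nl_index.index) by an online insertion sort that places each (key, values)
-- pair directly at its sorted slot (objective: alternative).


-- ===== PORT A =====
-- nl[idx][key].append(l_value): read the single-key dict at index idx, append v to its entry for key, write it back
def pvUpdA (nl : List (List (String × List Int))) (i : Int) (key : String) (v : Int) :
    List (List (String × List Int)) :=
  PySem.List.pySetD nl i
    ((PySem.List.pyGetD nl i []).map (fun p => if p.1 == key then (p.1, p.2 ++ [v]) else p))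

def dict_lists_to_list_dict (dict : List (String × List (String × Int))) :
    List (List (String × List Int)) :=
  -- first loop: for k in sorted(dict.keys()): nl.append({k: []}); nl_index.append(k)
  let first := (PySem.List.sorted (dict.map (·.1)) (fun k => k)).foldl
    (fun st k => (st.1 ++ [[(k, ([] : List Int))]], st.2 ++ [k])) ([], [])
  -- second loop: for key, l in dict.items(): for l_key, l_value in l.items(): nl[nl_index.index(key)][key].append(l_value)
  dict.foldl (fun nl kl =>
    kl.2.foldl (fun nl p =>
      match PySem.List.index? first.2 kl.1 with
      | some i => pvUpdA nl (i : Int) kl.1 p.2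
      | none => nl) nl) first.1

-- ===== PORT B =====
-- the while/insert step: scan past the pairs whose key is < k, insert (k, vs) there
def pvInsB (nl : List (String × List Int)) (k : String) (vs : List Int) :
    List (String × List Int) :=
  match nl with
  | [] => [(k, vs)]
  | p :: rest => if p.1 < k then p :: pvInsB rest k vs else (k, vs) :: p :: rest

def dict_lists_to_list_dict_alt (dict : List (String × List (String × Int))) :
    List (List (String × List Int)) :=
  -- for k, inner in dict.items(): insert (k, list(inner.values())) at its sorted slot
  (dict.foldl (fun nl kl => pvInsB nl kl.1 (kl.2.map (·.2))) []).map (fun p => [(p.1, p.2)])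

-- ===== PRECONDITION & SPEC =====
-- Pre_ excludes association lists with duplicate outer keys: a Python dict argument can never
-- present them, and on such lists the two ports' readings of the non-dict input are both
-- accidental (A routes every value to the first duplicate's bucket, B keeps one pair per
-- duplicate occurrence).
def Pre_dict_lists_to_list_dict (dict : List (String × List (String × Int))) : Prop :=
  (dict.map (·.1)).Nodup
instance (dict : List (String × List (String × Int))) : Decidable (Pre_dict_lists_to_list_dict dict) := by unfold Pre_dict_lists_to_list_dict; infer_instance
def pvWitness_dict_lists_to_list_dict : (List (String × List (String × Int))) :=
  [("b", [("x", 1), ("y", 2)]), ("a", [])]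

def Spec_dict_lists_to_list_dict (dict : List (String × List (String × Int))) (out : List (List (String × List Int))) : Prop := out = dict_lists_to_list_dict_alt dict
instance (dict : List (String × List (String × Int))) (out : List (List (String × List Int))) : Decidable (Spec_dict_lists_to_list_dict dict out) := by unfold Spec_dict_lists_to_list_dict; infer_instance

-- ===== CLAIM (what is proved, stated in full; the proofs are below) =====
def Claim_equal_dict_lists_to_list_dict : Prop := ∀ (dict : List (String × List (String × Int))), Dom_dict_lists_to_list_dict dict → Pre_dict_lists_to_list_dict dict → Spec_dict_lists_to_list_dict dict (dict_lists_to_list_dict dict)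

-- ===== LEMMAS AND PROOFS =====

-- ---------- A-side: characterise A's scatter passes ----------

-- pvUpdA at a natural index is set/getD
theorem pvUpdA_natCast (nl : List (List (String × List Int))) (n : Nat) (key : String) (v : Int) :
    pvUpdA nl (n : Int) key v
      = nl.set n ((nl.getD n []).map (fun p => if p.1 == key then (p.1, p.2 ++ [v]) else p)) := by
  simp [pvUpdA, PySem.List.pySetD_natCast, PySem.List.pyGetD_natCast]

-- one executed append on a state in bucket form: only key's bucket grows
theorem pvUpdOne (keys : List String) (f : String → List Int) (key : String) (v : Int)
    (hmem : key ∈ keys) (hnd : keys.Nodup) :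
    (match PySem.List.index? keys key with
     | some i => pvUpdA (keys.map (fun k => [(k, f k)])) (i : Int) key v
     | none => keys.map (fun k => [(k, f k)]))
    = keys.map (fun k => [(k, if k = key then f k ++ [v] else f k)]) := by
  induction keys generalizing f with
  | nil => cases hmem
  | cons a ks ih =>
    by_cases hak : a = key
    · subst hak
      rw [PySem.List.index?_cons_self]
      have ha : a ∉ ks := (List.nodup_cons.mp hnd).1
      show pvUpdA (List.map (fun k => [(k, f k)]) (a :: ks)) ((0 : Nat) : Int) a v = _
      rw [pvUpdA_natCast]
      simp only [List.map_cons, List.getD_cons_zero, List.set_cons_zero]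
      refine congrArg₂ List.cons ?_ ?_
      · simp
      · exact List.map_congr_left (fun k hk => by
          have hne : k ≠ a := fun h => ha (h ▸ hk)
          simp [hne])
    · have hks : key ∈ ks := by
        rcases List.mem_cons.mp hmem with h | h
        · exact absurd h.symm hak
        · exact h
      obtain ⟨i, hi⟩ := Option.isSome_iff_exists.mp ((PySem.List.index?_isSome_iff ks key).mpr hks)
      rw [PySem.List.index?_cons_of_ne ks hak, hi]
      simp only [Option.map_some]
      show pvUpdA (List.map (fun k => [(k, f k)]) (a :: ks)) ((i + 1 : Nat) : Int) key v = _
      have h0 := ih f hks (List.nodup_cons.mp hnd).2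
      rw [hi] at h0
      have ih' : pvUpdA (ks.map (fun k => [(k, f k)])) ((i : Nat) : Int) key v
          = ks.map (fun k => [(k, if k = key then f k ++ [v] else f k)]) := h0
      rw [pvUpdA_natCast] at ih' ⊢
      simp only [List.map_cons, List.set_cons_succ, List.getD_cons_succ]
      rw [ih']
      simp [hak]

-- the inner loop over one entry's values, on a state in bucket form
theorem pvInnerFold (l : List (String × Int)) (keys : List String) (f : String → List Int)
    (key : String) (hmem : key ∈ keys) (hnd : keys.Nodup) :
    l.foldl (fun nl p =>
        match PySem.List.index? keys key with
        | some i => pvUpdA nl (i : Int) key p.2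
        | none => nl) (keys.map (fun k => [(k, f k)]))
    = keys.map (fun k => [(k, if k = key then f k ++ l.map (·.2) else f k)]) := by
  induction l generalizing f with
  | nil => exact List.map_congr_left (fun k _ => by by_cases hk : k = key <;> simp [hk])
  | cons p l ih =>
    rw [List.foldl_cons, pvUpdOne keys f key p.2 hmem hnd,
      ih (fun k => if k = key then f k ++ [p.2] else f k)]
    refine List.map_congr_left (fun k _ => ?_)
    by_cases hk : k = key <;> simp [hk]

-- the values A's scatter pass accumulates for key k
def pvVals (rest : List (String × List (String × Int))) (k : String) : List Int :=
  (rest.filter (fun p => p.1 == k)).flatMap (fun p => p.2.map (·.2))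

-- the outer loop, on a state in bucket form
theorem pvOuterFold (rest : List (String × List (String × Int))) (keys : List String)
    (f : String → List Int) (hsub : ∀ p ∈ rest, p.1 ∈ keys) (hnd : keys.Nodup) :
    rest.foldl (fun nl kl =>
        kl.2.foldl (fun nl p =>
          match PySem.List.index? keys kl.1 with
          | some i => pvUpdA nl (i : Int) kl.1 p.2
          | none => nl) nl) (keys.map (fun k => [(k, f k)]))
    = keys.map (fun k => [(k, f k ++ pvVals rest k)]) := by
  induction rest generalizing f with
  | nil => simp [pvVals]
  | cons q rest ih =>
    rw [List.foldl_cons,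
      pvInnerFold q.2 keys f q.1 (hsub q List.mem_cons_self) hnd,
      ih (fun k => if k = q.1 then f k ++ q.2.map (·.2) else f k)
        (fun p hp => hsub p (List.mem_cons_of_mem q hp))]
    refine List.map_congr_left (fun k _ => ?_)
    by_cases hkq : k = q.1
    · have hqk : (q.1 == k) = true := by simp [hkq]
      simp [pvVals, hkq, List.append_assoc]
    · have hqk : (q.1 == k) = false := beq_eq_false_iff_ne.mpr (fun h => hkq h.symm)
      simp [pvVals, hkq, hqk]

-- with unique outer keys the accumulated values are exactly that key's inner values
theorem pvVals_eq (dict : List (String × List (String × Int)))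
    (q : String × List (String × Int)) (hq : q ∈ dict) (hnd : (dict.map (·.1)).Nodup) :
    pvVals dict q.1 = q.2.map (·.2) := by
  induction dict with
  | nil => cases hq
  | cons p rest ih =>
    rw [List.map_cons] at hnd
    obtain ⟨hh, ht⟩ := List.nodup_cons.mp hnd
    rcases List.mem_cons.mp hq with h | h
    · subst h
      have hnotin : ∀ r ∈ rest, ¬ (r.1 == q.1) = true := by
        intro r hr hbeq
        have hrq : r.1 = q.1 := by simpa using hbeq
        exact hh (hrq ▸ List.mem_map_of_mem (f := fun x => x.1) hr)
      simp only [pvVals, List.filter_cons, BEq.rfl]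
      rw [List.filter_eq_nil_iff.mpr hnotin]
      simp
    · have hne : (p.1 == q.1) = false := by
        refine beq_eq_false_iff_ne.mpr (fun hpq => ?_)
        exact hh (hpq ▸ List.mem_map_of_mem (f := fun x => x.1) h)
      simpa [pvVals, hne] using ih h ht

-- ---------- B-side: characterise the insertion sort ----------

theorem pvInsB_perm (nl : List (String × List Int)) (k : String) (vs : List Int) :
    (pvInsB nl k vs).Perm ((k, vs) :: nl) := by
  induction nl with
  | nil => simp [pvInsB]
  | cons p rest ih =>
    unfold pvInsB
    by_cases h : p.1 < k
    · simpa [h] using (ih.cons p).trans (List.Perm.swap _ _ _)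
    · simp [h]

theorem pvInsB_pairwise (nl : List (String × List Int)) (k : String) (vs : List Int)
    (hp : nl.Pairwise (fun a b => a.1 < b.1)) (hk : ∀ p ∈ nl, p.1 ≠ k) :
    (pvInsB nl k vs).Pairwise (fun a b => a.1 < b.1) := by
  induction nl with
  | nil => simp [pvInsB]
  | cons p rest ih =>
    obtain ⟨hhead, htail⟩ := List.pairwise_cons.mp hp
    unfold pvInsB
    by_cases h : p.1 < k
    · simp only [if_pos h]
      refine List.pairwise_cons.mpr
        ⟨?_, ih htail (fun r hr => hk r (List.mem_cons_of_mem p hr))⟩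
      intro r hr
      rcases List.mem_cons.mp (((pvInsB_perm rest k vs).mem_iff).mp hr) with rfl | h1
      · exact h
      · exact hhead r h1
    · have hlt : k < p.1 := lt_of_le_of_ne (not_lt.mp h) (Ne.symm (hk p List.mem_cons_self))
      simp only [if_neg h]
      refine List.pairwise_cons.mpr ⟨?_, hp⟩
      intro r hr
      rcases List.mem_cons.mp hr with h1 | h1
      · exact h1 ▸ hlt
      · exact lt_trans hlt (hhead r h1)

-- the fold over dict: a sorted permutation of the (key, inner values) items
theorem pvFoldB (rest : List (String × List (String × Int))) (acc : List (String × List Int))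
    (hp : acc.Pairwise (fun a b => a.1 < b.1))
    (hnd : (acc.map (·.1) ++ rest.map (·.1)).Nodup) :
    (rest.foldl (fun nl kl => pvInsB nl kl.1 (kl.2.map (·.2))) acc).Perm
        (acc ++ rest.map (fun q => (q.1, q.2.map (·.2)))) ∧
    (rest.foldl (fun nl kl => pvInsB nl kl.1 (kl.2.map (·.2))) acc).Pairwise
        (fun a b => a.1 < b.1) := by
  induction rest generalizing acc with
  | nil => exact ⟨by simpa using List.Perm.refl acc, hp⟩
  | cons q rest ih =>
    rw [List.map_cons] at hnd
    have hkeyperm : ((pvInsB acc q.1 (q.2.map (·.2))).map (·.1)).Perm (q.1 :: acc.map (·.1)) := by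
      simpa using (pvInsB_perm acc q.1 (q.2.map (·.2))).map (·.1)
    have hnd1 : (q.1 :: (acc.map (·.1) ++ rest.map (·.1))).Nodup :=
      (List.perm_middle (a := q.1) (l₁ := acc.map (·.1)) (l₂ := rest.map (·.1))).nodup hnd
    have hknotacc : ∀ p ∈ acc, p.1 ≠ q.1 := by
      intro p hpm hpq
      exact (List.nodup_cons.mp hnd1).1 (List.mem_append_left _ (hpq ▸ List.mem_map_of_mem (f := fun x => x.1) hpm))
    have hp' := pvInsB_pairwise acc q.1 (q.2.map (·.2)) hp hknotacc
    have hnd' : ((pvInsB acc q.1 (q.2.map (·.2))).map (·.1) ++ rest.map (·.1)).Nodup := by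
      have e : ((pvInsB acc q.1 (q.2.map (·.2))).map (·.1) ++ rest.map (·.1)).Perm
          (q.1 :: (acc.map (·.1) ++ rest.map (·.1))) := by
        simpa using hkeyperm.append_right (rest.map (·.1))
      exact e.symm.nodup hnd1
    obtain ⟨hperm, hpw⟩ := ih (pvInsB acc q.1 (q.2.map (·.2))) hp' hnd'
    refine ⟨?_, by simpa using hpw⟩
    simp only [List.foldl_cons, List.map_cons]
    have s2 : (pvInsB acc q.1 (q.2.map (·.2)) ++ rest.map (fun r => (r.1, r.2.map (·.2)))).Perm
        (((q.1, q.2.map (·.2)) :: acc) ++ rest.map (fun r => (r.1, r.2.map (·.2)))) :=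
      (pvInsB_perm acc q.1 (q.2.map (·.2))).append_right _
    have s3 : (((q.1, q.2.map (·.2)) :: acc) ++ rest.map (fun r => (r.1, r.2.map (·.2)))).Perm
        (acc ++ (q.1, q.2.map (·.2)) :: rest.map (fun r => (r.1, r.2.map (·.2)))) :=
      by simpa using (List.perm_middle (a := (q.1, q.2.map (·.2))) (l₁ := acc)
        (l₂ := rest.map (fun r => (r.1, r.2.map (·.2))))).symm
    exact hperm.trans (s2.trans s3)

-- ===== VERDICT (by name: the statement is the Claim_ definition above) =====
theorem dict_lists_to_list_dict_spec : Claim_equal_dict_lists_to_list_dict := by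
  intro dict _ hpre
  unfold Spec_dict_lists_to_list_dict dict_lists_to_list_dict dict_lists_to_list_dict_alt
  -- reduce A's two phases to buckets over the sorted keys
  rw [PySem.List.foldl_prod_mk (fun acc k => acc ++ [[(k, ([] : List Int))]])
      (fun acc k => acc ++ [k]),
    PySem.List.foldl_append_singleton_eq_map (fun k => [(k, ([] : List Int))]),
    PySem.List.foldl_append_singleton]
  simp only [List.nil_append]
  have hperm := PySem.List.sorted_perm (dict.map (·.1)) (fun k => k) false
  have hnds : (PySem.List.sorted (dict.map (·.1)) (fun k => k)).Nodup :=
    hperm.symm.nodup hpre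
  rw [pvOuterFold dict _ (fun _ => [])
    (fun p hp => (PySem.List.mem_sorted _ _ _ _).mpr (List.mem_map_of_mem hp)) hnds]
  -- characterise B's fold
  obtain ⟨hbperm, hbpw⟩ := pvFoldB dict [] (by simp) (by simpa using hpre)
  -- the sorted key list is exactly B's key list
  have hkp : ((dict.foldl (fun nl kl => pvInsB nl kl.1 (kl.2.map (·.2))) []).map (·.1)).Perm
      (dict.map (·.1)) := by
    refine (hbperm.map (·.1)).trans ?_
    simp [List.map_map, Function.comp_def]
  have hkw : ((dict.foldl (fun nl kl => pvInsB nl kl.1 (kl.2.map (·.2))) []).map (·.1)).Pairwise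
      (· < ·) := List.pairwise_map.mpr hbpw
  have hkeys := PySem.List.sorted_eq_of_perm_of_pairwise_lt (dict.map (·.1)) _ (fun k => k) hkp hkw
  rw [hkeys, List.map_map]
  refine List.map_congr_left (fun p hp => ?_)
  obtain ⟨q, hq, rfl⟩ := List.mem_map.mp (hbperm.mem_iff.mp hp)
  simp [pvVals_eq dict q hq hpre]
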